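-- pv_equiv track=rewrite | github.com/ydb-platform/ydb | .github/scripts/tests/update_mute_issues.py | _extract_unmuted_tests_from_comment
-- ===== SOURCE A (Python) =====
-- UNMUTE_LIST_START_MARKER = "<!--unmute_list_start-->"
--
-- UNMUTE_LIST_END_MARKER = "<!--unmute_list_end-->"
--
-- def _extract_unmuted_tests_from_comment(comment_body):
--     if not comment_body:
--         return set()
--
--     payload = comment_body
--     if UNMUTE_LIST_START_MARKER in comment_body and UNMUTE_LIST_END_MARKER in comment_body:
--         start_idx = comment_body.find(UNMUTE_LIST_START_MARKER) + len(UNMUTE_LIST_START_MARKER)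
--         end_idx = comment_body.find(UNMUTE_LIST_END_MARKER)
--         payload = comment_body[start_idx:end_idx]
--
--     tests = set()
--     for line in payload.split('\n'):
--         line = line.strip()
--         if line.startswith('- Test '):
--             tests.add(line[len('- Test '):].replace(' unmuted', ''))
--     return tests
-- ===== SOURCE B (Python) =====
-- import re
--
-- UNMUTE_LIST_START_MARKER = "<!--unmute_list_start-->"
--
-- UNMUTE_LIST_END_MARKER = "<!--unmute_list_end-->"
--
-- # One multiline regex collects the '- Test ...' items in a single findall pass;
-- # empty names are skipped and the ' unmuted' marker is removed from each name.
-- _TEST_ITEM_RE = re.compile(r'^\s*- Test (.*?)\s*$', re.MULTILINE)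
--
--
-- def _extract_unmuted_tests_from_comment(comment_body):
--     if not comment_body:
--         return set()
--
--     payload = comment_body
--     if UNMUTE_LIST_START_MARKER in comment_body and UNMUTE_LIST_END_MARKER in comment_body:
--         start_idx = comment_body.find(UNMUTE_LIST_START_MARKER) + len(UNMUTE_LIST_START_MARKER)
--         end_idx = comment_body.find(UNMUTE_LIST_END_MARKER)
--         payload = comment_body[start_idx:end_idx]
--
--     return {name.replace(' unmuted', '')
--             for name in _TEST_ITEM_RE.findall(payload)
--             if name}
-- ===== Notes on version B (the rewrite author's own statement) =====
-- stated objective: idiomatic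
-- what changed: The per-line strip/startswith/slice loop is replaced by one precompiled multiline-regex findall pass that collects the bullet-list test names (skipping empty names), each of which then gets the same literal marker replacement; the marker-slicing guard is unchanged.
import Mathlib
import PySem

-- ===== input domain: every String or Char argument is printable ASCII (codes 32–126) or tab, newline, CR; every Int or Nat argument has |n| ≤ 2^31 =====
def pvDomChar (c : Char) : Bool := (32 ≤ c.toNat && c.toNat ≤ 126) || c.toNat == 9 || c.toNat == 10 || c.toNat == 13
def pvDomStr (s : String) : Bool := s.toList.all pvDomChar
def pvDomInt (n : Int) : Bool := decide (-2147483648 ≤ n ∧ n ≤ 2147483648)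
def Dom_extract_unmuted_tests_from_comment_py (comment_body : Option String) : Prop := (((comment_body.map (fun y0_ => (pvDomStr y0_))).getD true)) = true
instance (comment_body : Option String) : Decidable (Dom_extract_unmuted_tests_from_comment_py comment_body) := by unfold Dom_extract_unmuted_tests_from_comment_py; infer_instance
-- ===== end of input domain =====

-- B replaces A's per-line strip/startswith/slice loop by one multiline-regex findall pass
-- (skipping empty names), each capture fed through the same ' unmuted' replacement
-- (objective: idiomatic); the marker-slicing guard is kept identical.

def pvStartMarker : List Char := "<!--unmute_list_start-->".toList
def pvEndMarker : List Char := "<!--unmute_list_end-->".toList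
def pvTestPrefix : List Char := "- Test ".toList
def pvUnmuted : List Char := " unmuted".toList

-- ===== PORT A =====
def extract_unmuted_tests_from_comment_py (comment_body : Option String) : List String :=
  match comment_body with
  | none => []
  | some cb =>
    if cb = "" then [] else
    let s := cb.toList
    let payload :=
      if PySem.Chars.isIn pvStartMarker s && PySem.Chars.isIn pvEndMarker s then
        PySem.Chars.slice s (some (PySem.Chars.find s pvStartMarker + (pvStartMarker.length : Int)))
          (some (PySem.Chars.find s pvEndMarker))
      else s
    (PySem.Chars.splitOn payload ['\n']).foldl (fun tests line =>
      let line := PySem.Chars.strip line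
      if PySem.Chars.startswith line pvTestPrefix then
        PySem.Set.add tests (String.ofList (PySem.Chars.replace (PySem.Chars.slice line (some 7) none) pvUnmuted []))
      else tests) PySem.Set.empty

-- ===== PORT B =====
-- Python's \s character class, restricted to the Dom alphabet (printable ASCII + tab/LF/CR)
def pvWs (c : Char) : Bool := c = ' ' || c = '\t' || c = '\n' || c = '\r'

-- Hand port of Source B's re.findall(r'^\s*- Test (.*?)\s*$', payload, re.MULTILINE): the
-- pattern is anchored ^…$, its literal part cannot match '\n' and '.' never matches '\n',
-- so on the Dom alphabet findall yields, per '\n'-separated line in order, the capture =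
-- rest of the line after leading whitespace and the literal '- Test ', with its trailing
-- whitespace run removed (leading \s* consuming '\n's only skips whitespace-only lines,
-- which produce no capture). Exact on Dom for this pattern.
def pvCapture (line : List Char) : Option (List Char) :=
  let rest := line.dropWhile pvWs
  if rest.take 7 = pvTestPrefix then
    some ((rest.drop 7).reverse.dropWhile pvWs).reverse
  else none

def pvFindallTestItems (payload : List Char) : List (List Char) :=
  (PySem.Chars.splitOn payload ['\n']).filterMap pvCapture

def extract_unmuted_tests_from_comment_py_alt (comment_body : Option String) : List String :=
  match comment_body with
  | none => []
  | some cb =>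
    if cb = "" then [] else
    let s := cb.toList
    let payload :=
      if PySem.Chars.isIn pvStartMarker s && PySem.Chars.isIn pvEndMarker s then
        PySem.Chars.slice s (some (PySem.Chars.find s pvStartMarker + (pvStartMarker.length : Int)))
          (some (PySem.Chars.find s pvEndMarker))
      else s
    PySem.Set.ofList (((pvFindallTestItems payload).filter (fun name => !name.isEmpty)).map
      (fun name => String.ofList (PySem.Chars.replace name pvUnmuted [])))

-- ===== PRECONDITION & SPEC =====
def Spec_extract_unmuted_tests_from_comment_py (comment_body : Option String) (out : List String) : Prop := out = extract_unmuted_tests_from_comment_py_alt comment_body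
instance (comment_body : Option String) (out : List String) : Decidable (Spec_extract_unmuted_tests_from_comment_py comment_body out) := by unfold Spec_extract_unmuted_tests_from_comment_py; infer_instance

-- ===== CLAIM (what is proved, stated in full; the proofs are below) =====
def Claim_equal_extract_unmuted_tests_from_comment_py : Prop := ∀ (comment_body : Option String), Dom_extract_unmuted_tests_from_comment_py comment_body → Spec_extract_unmuted_tests_from_comment_py comment_body (extract_unmuted_tests_from_comment_py comment_body)

-- ===== LEMMAS AND PROOFS =====

theorem pv_char_toNat_inj {c d : Char} (h : c.toNat = d.toNat) : c = d :=
  Char.ext (UInt32.toNat_inj.mp h)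

-- On the Dom alphabet, Python's str.strip whitespace class coincides with pvWs.
theorem pv_isspace_eq_ws {c : Char} (h : pvDomChar c = true) :
    PySem.Chars.isspace c = pvWs c := by
  simp only [pvDomChar, Bool.or_eq_true, Bool.and_eq_true, decide_eq_true_eq, beq_iff_eq] at h
  have hiff : ∀ d : Char, (c = d) ↔ (c.toNat = d.toNat) :=
    fun d => ⟨fun e => e ▸ rfl, fun e => pv_char_toNat_inj e⟩
  have e32 : (' ' : Char).toNat = 32 := rfl
  have e9 : ('\t' : Char).toNat = 9 := rfl
  have e10 : ('\n' : Char).toNat = 10 := rfl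
  have e13 : ('\r' : Char).toNat = 13 := rfl
  simp only [PySem.Chars.isspace, pvWs]
  apply Bool.eq_iff_iff.mpr
  simp only [Bool.or_eq_true, Bool.and_eq_true, decide_eq_true_eq, hiff, e32, e9, e10, e13]
  omega

theorem pv_dropWhile_congr {p q : Char → Bool} {l : List Char}
    (h : ∀ c ∈ l, p c = q c) : l.dropWhile p = l.dropWhile q := by
  induction l with
  | nil => rfl
  | cons a t ih =>
    have ha := h a (by simp)
    by_cases hp : p a = true
    · rw [List.dropWhile_cons_of_pos hp, List.dropWhile_cons_of_pos (ha ▸ hp),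
        ih (fun c hc => h c (by simp [hc]))]
    · rw [List.dropWhile_cons_of_neg hp, List.dropWhile_cons_of_neg (fun hq => hp (ha ▸ hq))]

-- characters of the pieces of splitOn … ['\n'] are characters of the input
theorem pv_splitOn_go_chars (Q : Char → Prop) :
    ∀ (fuel : Nat) (l cur : List Char) (acc : List (List Char)),
    l.length < fuel →
    (∀ c ∈ l, Q c) →
    (∀ c ∈ cur, Q c) →
    (∀ p ∈ acc, ∀ c ∈ p, Q c) →
    ∀ p ∈ PySem.Chars.splitOn.go ['\n'] fuel l cur acc, ∀ c ∈ p, Q c := by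
  intro fuel
  induction fuel with
  | zero => intro l cur acc hf; omega
  | succ fuel ih =>
    intro l cur acc hf hl hcur hacc
    match l with
    | [] =>
      rw [show PySem.Chars.splitOn.go ['\n'] (fuel+1) [] cur acc = (cur.reverse :: acc).reverse from rfl]
      intro p hp c hc
      simp only [List.mem_reverse, List.mem_cons] at hp
      rcases hp with rfl | hp
      · exact hcur c (by simpa using hc)
      · exact hacc p hp c hc
    | ch :: rest =>
      rw [show PySem.Chars.splitOn.go ['\n'] (fuel+1) (ch::rest) cur acc =
        (if List.isPrefixOf ['\n'] (ch::rest) then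
          PySem.Chars.splitOn.go ['\n'] fuel (List.drop 1 (ch::rest)) [] (cur.reverse :: acc)
        else PySem.Chars.splitOn.go ['\n'] fuel rest (ch::cur) acc) from rfl]
      by_cases hpre : List.isPrefixOf ['\n'] (ch :: rest) = true
      · rw [if_pos hpre]
        refine ih _ _ _ (by simp at hf ⊢; omega)
          (fun c hc => hl c (List.mem_of_mem_drop hc)) (by simp) ?_
        intro p hp c hc
        simp only [List.mem_cons] at hp
        rcases hp with rfl | hp
        · exact hcur c (by simpa using hc)
        · exact hacc p hp c hc
      · rw [if_neg hpre]
        refine ih _ _ _ (by simp at hf ⊢; omega)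
          (fun c hc => hl c (by simp [hc])) ?_ hacc
        intro c hc
        simp only [List.mem_cons] at hc
        rcases hc with rfl | hc
        · exact hl c (by simp)
        · exact hcur c hc

theorem pv_splitOn_chars (Q : Char → Prop) (s : List Char) (h : ∀ c ∈ s, Q c) :
    ∀ p ∈ PySem.Chars.splitOn s ['\n'], ∀ c ∈ p, Q c :=
  pv_splitOn_go_chars Q (s.length + 1) s [] [] (by omega) h (by simp) (by simp)

-- the per-line equivalence: A's strip/startswith/slice step produces exactly B's capture
-- with empty captures filtered out, fed through the same replacement
theorem pv_line_eq (l : List Char) (hd : ∀ c ∈ l, pvDomChar c = true) :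
    (if PySem.Chars.startswith (PySem.Chars.strip l) pvTestPrefix then
        some (String.ofList (PySem.Chars.replace (PySem.Chars.slice (PySem.Chars.strip l) (some 7) none) pvUnmuted []))
      else none)
    = (((pvCapture l).filter (fun name => !name.isEmpty)).map
        (fun name => String.ofList (PySem.Chars.replace name pvUnmuted []))) := by
  have hws : ∀ c ∈ l, PySem.Chars.isspace c = pvWs c :=
    fun c hc => pv_isspace_eq_ws (hd c hc)
  have hrest_sub : ∀ c ∈ l.dropWhile pvWs, c ∈ l :=
    fun c hc => (List.dropWhile_suffix pvWs).sublist.subset hc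
  have hlstrip : PySem.Chars.lstrip l = l.dropWhile pvWs := by
    simp only [PySem.Chars.lstrip]; exact pv_dropWhile_congr hws
  have hstrip : PySem.Chars.strip l = ((l.dropWhile pvWs).reverse.dropWhile pvWs).reverse := by
    simp only [PySem.Chars.strip, hlstrip, PySem.Chars.rstrip]
    congr 1
    exact pv_dropWhile_congr (fun c hc => hws c (hrest_sub c (List.mem_reverse.mp hc)))
  unfold pvCapture
  simp only
  by_cases hc7 : (l.dropWhile pvWs).take 7 = pvTestPrefix
  · have hsplit : l.dropWhile pvWs = pvTestPrefix ++ (l.dropWhile pvWs).drop 7 := by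
      conv_lhs => rw [← List.take_append_drop 7 (l.dropWhile pvWs)]
      rw [hc7]
    have hrev : (l.dropWhile pvWs).reverse
        = ((l.dropWhile pvWs).drop 7).reverse ++ pvTestPrefix.reverse := by
      conv_lhs => rw [hsplit]
      rw [List.reverse_append]
    by_cases hcap : ((l.dropWhile pvWs).drop 7).reverse.dropWhile pvWs = []
    · have hdw : (l.dropWhile pvWs).reverse.dropWhile pvWs
          = pvTestPrefix.reverse.dropWhile pvWs := by
        rw [hrev, List.dropWhile_append, if_pos (by simp [hcap])]
      have hst : PySem.Chars.strip l = "- Test".toList := by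
        rw [hstrip, hdw]; rfl
      have hswf : PySem.Chars.startswith (PySem.Chars.strip l) pvTestPrefix = false := by
        rw [hst]; decide
      simp [hswf, hc7, hcap, Option.filter]
    · have hdw : (l.dropWhile pvWs).reverse.dropWhile pvWs
          = ((l.dropWhile pvWs).drop 7).reverse.dropWhile pvWs ++ pvTestPrefix.reverse := by
        rw [hrev, List.dropWhile_append, if_neg (by simp [hcap])]
      have hst : PySem.Chars.strip l
          = pvTestPrefix ++ (((l.dropWhile pvWs).drop 7).reverse.dropWhile pvWs).reverse := by
        rw [hstrip, hdw, List.reverse_append, List.reverse_reverse]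
      have hcapne : (((l.dropWhile pvWs).drop 7).reverse.dropWhile pvWs).reverse ≠ [] := by
        simpa using hcap
      have hswt : PySem.Chars.startswith (PySem.Chars.strip l) pvTestPrefix = true := by
        rw [hst]
        exact (PySem.Chars.startswith_iff _ _).mpr (List.prefix_append _ _)
      have hdrop : PySem.List.slice (PySem.Chars.strip l) (some 7) none
          = (((l.dropWhile pvWs).drop 7).reverse.dropWhile pvWs).reverse := by
        rw [hst]
        simp [pysem]
        exact List.drop_left' rfl
      have hne : (!(((l.dropWhile pvWs).drop 7).reverse.dropWhile pvWs).reverse.isEmpty) = true := by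
        simpa [List.isEmpty_iff] using hcapne
      simp only [hswt, hc7, if_true, PySem.Chars.slice_eq_listSlice, hdrop,
        Option.filter, hne, Option.map_some]
  · have hpfx : PySem.Chars.strip l <+: l.dropWhile pvWs := by
      rw [hstrip]
      have := List.dropWhile_suffix (l := (l.dropWhile pvWs).reverse) pvWs
      have h2 := List.reverse_prefix.mpr this
      simpa using h2
    rw [if_neg hc7, if_neg (by
      intro hsw
      have hp : pvTestPrefix <+: PySem.Chars.strip l := (PySem.Chars.startswith_iff _ _).mp hsw
      have hp2 : pvTestPrefix <+: l.dropWhile pvWs := hp.trans hpfx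
      have := List.prefix_iff_eq_take.mp hp2
      exact hc7 (by rw [show pvTestPrefix.length = 7 from rfl] at this; exact this.symm))]
    rfl

-- filtering after a filterMap is a filterMap with a filtered result
theorem pv_filter_filterMap {α β : Type} (f : α → Option β) (p : β → Bool) (l : List α) :
    (l.filterMap f).filter p = l.filterMap (fun x => (f x).filter p) := by
  induction l with
  | nil => rfl
  | cons a t ih =>
    simp only [List.filterMap_cons]
    cases h : f a with
    | none => simpa [Option.filter] using ih
    | some b =>
      by_cases hp : p b = true <;> simp [Option.filter, hp, ih]

-- a loop that conditionally adds is the fold of Set.add over the filterMap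
theorem pv_foldl_opt {α β : Type} [BEq β] (g : α → Option β) (l : List α) (init : PySem.Set β) :
    l.foldl (fun s x => match g x with | some y => PySem.Set.add s y | none => s) init
      = (l.filterMap g).foldl PySem.Set.add init := by
  induction l generalizing init with
  | nil => rfl
  | cons a t ih =>
    simp only [List.foldl_cons, List.filterMap_cons]
    cases g a <;> simp [ih]

-- ===== VERDICT (by name: the statement is the Claim_ definition above) =====
theorem extract_unmuted_tests_from_comment_py_spec : Claim_equal_extract_unmuted_tests_from_comment_py := by
  intro comment_body hdom
  unfold Spec_extract_unmuted_tests_from_comment_py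
  unfold extract_unmuted_tests_from_comment_py extract_unmuted_tests_from_comment_py_alt
  match comment_body with
  | none => rfl
  | some cb =>
    simp only
    by_cases hcb : cb = ""
    · simp [hcb]
    · rw [if_neg hcb, if_neg hcb]
      simp only [Dom_extract_unmuted_tests_from_comment_py, Option.map_some, Option.getD_some,
        pvDomStr, List.all_eq_true] at hdom
      set s := cb.toList with hs
      set payload :=
        (if PySem.Chars.isIn pvStartMarker s && PySem.Chars.isIn pvEndMarker s then
          PySem.Chars.slice s (some (PySem.Chars.find s pvStartMarker + (pvStartMarker.length : Int)))
            (some (PySem.Chars.find s pvEndMarker))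
        else s) with hpayload
      have hpay : ∀ c ∈ payload, pvDomChar c = true := by
        rw [hpayload]
        split
        · intro c hc
          simp only [PySem.Chars.slice_eq_listSlice] at hc
          exact hdom c (PySem.List.mem_of_mem_slice _ _ _ hc)
        · exact hdom
      have hlines := pv_splitOn_chars (fun c => pvDomChar c = true) payload hpay
      unfold pvFindallTestItems
      rw [PySem.Set.ofList_eq_foldl, pv_filter_filterMap, List.map_filterMap]
      rw [← pv_foldl_opt (fun line => ((pvCapture line).filter (fun name => !name.isEmpty)).map
        (fun name => String.ofList (PySem.Chars.replace name pvUnmuted [])))]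
      apply PySem.List.foldl_congr_mem
      intro acc line hline
      have := pv_line_eq line (fun c hc => hlines line hline c hc)
      simp only at this ⊢
      rw [← this]
      by_cases hsw : PySem.Chars.startswith (PySem.Chars.strip line) pvTestPrefix = true
      · rw [if_pos hsw, if_pos hsw]
      · rw [if_neg hsw, if_neg hsw]
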